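-- pv_equiv track=rewrite | github.com/jayarajporoor/ganitalib | src/aryabhata_square_root.py | find_two_digit_square
-- ===== SOURCE A (Python) =====
-- two_digit_squares = [0, 1, 4,  9, 16, 25, 36, 49, 64, 81]
--
-- def find_two_digit_square(current):
--     num = 0
--     for m in range(len(two_digit_squares)-1, -1, -1):
--         m_square = two_digit_squares[m]
--         if m_square < current:
--             num = m + 1
--             break
--         elif m_square == current:
--             num = m
--             break
--     return num, two_digit_squares[num]
-- ===== SOURCE B (Python) =====
-- two_digit_squares = [0, 1, 4,  9, 16, 25, 36, 49, 64, 81]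
--
-- def find_two_digit_square(current):
--     # binary search (bisect_left) for the smallest index whose square is >= current
--     lo, hi = 0, len(two_digit_squares)
--     while lo < hi:
--         mid = (lo + hi) // 2
--         if two_digit_squares[mid] < current:
--             lo = mid + 1
--         else:
--             hi = mid
--     return lo, two_digit_squares[lo]
-- ===== Notes on version B (the rewrite author's own statement) =====
-- stated objective: idiomatic
-- what changed: Replaces the descending linear scan with break/else bookkeeping by a hand-rolled bisect_left binary search over the same fixed table, indexing the table with the found position exactly as A does.
import Mathlib
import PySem

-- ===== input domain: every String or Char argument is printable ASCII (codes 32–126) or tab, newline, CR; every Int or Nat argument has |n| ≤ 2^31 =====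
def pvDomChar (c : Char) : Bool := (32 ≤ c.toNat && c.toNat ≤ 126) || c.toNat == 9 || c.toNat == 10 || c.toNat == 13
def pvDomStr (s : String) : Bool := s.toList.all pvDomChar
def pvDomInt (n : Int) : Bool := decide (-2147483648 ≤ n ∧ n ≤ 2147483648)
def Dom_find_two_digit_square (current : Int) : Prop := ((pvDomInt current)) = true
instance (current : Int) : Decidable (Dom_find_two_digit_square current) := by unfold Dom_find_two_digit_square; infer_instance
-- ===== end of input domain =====

-- B replaces A's descending linear scan with a bisect_left-style binary search over the same fixed table (idiomatic alternative; return-value equivalence proved for current ≤ 81, where neither raises).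


-- ===== PORT A =====
-- module constant two_digit_squares (A's copy)
def tdsA : List Int := [0, 1, 4, 9, 16, 25, 36, 49, 64, 81]

-- the for-loop over range(9, -1, -1) with its two breaks; returning means break, [] means normal exit (num stays 0)
def loopA (current : Int) : List Int → Int
  | [] => 0
  | m :: rest =>
      let m_square := (PySem.List.pyGet? tdsA m).getD 0   -- index m is always in range here
      if m_square < current then m + 1
      else if m_square = current then m
      else loopA current rest

def find_two_digit_square (current : Int) : Int × Int :=
  let num := loopA current (PySem.List.pyRange 9 (-1) (-1))
  (num, (PySem.List.pyGet? tdsA num).getD 0)   -- pyGet? = none (IndexError) exactly when current > 81; excluded by Pre_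

-- ===== PORT B =====
-- module constant two_digit_squares (B's copy)
def tdsB : List Int := [0, 1, 4, 9, 16, 25, 36, 49, 64, 81]

-- the while lo < hi binary-search loop of Source B; the fuel argument (= initial hi) only makes the
-- recursion structural: hi - lo shrinks each iteration, so fuel = 10 is never exhausted from the call site
def blLoop (current : Int) : Nat → Nat → Nat → Nat
  | 0, lo, _hi => lo
  | fuel + 1, lo, hi =>
    if lo < hi then
      let mid := (lo + hi) / 2
      if (PySem.List.pyGet? tdsB (mid : Int)).getD 0 < current then
        blLoop current fuel (mid + 1) hi
      else
        blLoop current fuel lo mid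
    else lo

def find_two_digit_square_alt (current : Int) : Int × Int :=
  let lo := blLoop current 10 0 10
  ((lo : Int), (PySem.List.pyGet? tdsB (lo : Int)).getD 0)   -- pyGet? = none (IndexError) exactly when current > 81; excluded by Pre_

-- ===== PRECONDITION & SPEC =====
-- Pre_ excludes exactly current > 81, where A's final indexing two_digit_squares[10] raises IndexError (B raises there too).
def Pre_find_two_digit_square (current : Int) : Prop := current ≤ 81
instance (current : Int) : Decidable (Pre_find_two_digit_square current) := by unfold Pre_find_two_digit_square; infer_instance
def pvWitness_find_two_digit_square : Int := 50

def Spec_find_two_digit_square (current : Int) (out : Int × Int) : Prop := out = find_two_digit_square_alt current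
instance (current : Int) (out : Int × Int) : Decidable (Spec_find_two_digit_square current out) := by unfold Spec_find_two_digit_square; infer_instance

-- ===== CLAIM (what is proved, stated in full; the proofs are below) =====
def Claim_equal_find_two_digit_square : Prop := ∀ (current : Int), Dom_find_two_digit_square current → Pre_find_two_digit_square current → Spec_find_two_digit_square current (find_two_digit_square current)

-- ===== LEMMAS AND PROOFS =====

-- any value xs[i] (or the out-of-range default 0) drawn from either table copy is nonnegative
lemma tds_getD_nonneg (l : List Int) (hl : ∀ x ∈ l, 0 ≤ x) (i : Int) :
    0 ≤ (PySem.List.pyGet? l i).getD 0 := by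
  cases hg : PySem.List.pyGet? l i with
  | none => simp
  | some x => simpa using hl x (PySem.List.mem_of_pyGet?_eq_some l hg)

lemma tdsA_nonneg : ∀ x ∈ tdsA, (0:Int) ≤ x := by decide
lemma tdsB_nonneg : ∀ x ∈ tdsB, (0:Int) ≤ x := by decide

lemma loopA_neg (current : Int) (h : current < 0) :
    ∀ l : List Int, loopA current l = 0 := by
  intro l
  induction l with
  | nil => rfl
  | cons m rest ih =>
    have h0 := tds_getD_nonneg tdsA tdsA_nonneg m
    simp only [loopA]
    rw [if_neg (by omega), if_neg (by omega)]
    exact ih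

lemma blLoop_neg (current : Int) (h : current < 0) :
    ∀ fuel lo hi : Nat, blLoop current fuel lo hi = lo := by
  intro fuel
  induction fuel with
  | zero => intro lo hi; rfl
  | succ n ih =>
    intro lo hi
    rw [blLoop]
    split
    · have h0 := tds_getD_nonneg tdsB tdsB_nonneg (((lo + hi) / 2 : Nat) : Int)
      rw [if_neg (by omega)]
      exact ih lo ((lo + hi) / 2)
    · rfl

lemma A_neg (current : Int) (h : current < 0) : find_two_digit_square current = (0, 0) := by
  unfold find_two_digit_square
  rw [loopA_neg current h]
  decide

lemma B_neg (current : Int) (h : current < 0) : find_two_digit_square_alt current = (0, 0) := by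
  unfold find_two_digit_square_alt
  rw [blLoop_neg current h]
  decide

-- ===== VERDICT (by name: the statement is the Claim_ definition above) =====
theorem find_two_digit_square_spec : Claim_equal_find_two_digit_square := by
  intro current _ hpre
  unfold Spec_find_two_digit_square
  by_cases hc : 0 ≤ current
  · have h81 : current ≤ 81 := hpre
    interval_cases current <;> decide
  · rw [A_neg current (by omega), B_neg current (by omega)]
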